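-- pv_equiv track=rewrite | github.com/DTravkov/repo_test | lab-3/Functions-1/ANIMALSCOUNT.py | solve
-- ===== SOURCE A (Python) =====
-- def solve(numheads,numlegs):
--     if numlegs < numheads * 2 or numlegs > numheads * 4 or (numlegs % 4 != 0 and numlegs % 2 != 0):
--         return "Impossible"
--
--     chickens = 0
--     rabbits = 0
--
--     lst = list([2 for x in range(numheads)])
--
--     if sum(lst) < numlegs:
--         i = -1
--         while sum(lst) < numlegs:
--             lst[i] += 2
--             i -= 1
--
--
--
--     for x in lst:
--         if x == 2:
--             chickens += 1
--         elif x == 4: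
--             rabbits += 1
--     return f"Chickens: {chickens} , Rabbits : {rabbits}.\nChecking values  :\nInitial amount of legs = {numlegs}.\nAmount of legs in our calculation ({chickens} * 2 + {rabbits} * 4) = {chickens * 2 + rabbits * 4}.\nIn ths case my solution is {chickens * 2 + rabbits * 4 == numlegs}"
-- ===== SOURCE B (Python) =====
-- def solve(numheads, numlegs):
--     if numlegs < 2 * numheads or numlegs > 4 * numheads or numlegs % 2 != 0:
--         return "Impossible"
--     rabbits = (numlegs - 2 * numheads) // 2
--     chickens = numheads - rabbits
--     total = chickens * 2 + rabbits * 4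
--     return f"Chickens: {chickens} , Rabbits : {rabbits}.\nChecking values  :\nInitial amount of legs = {numlegs}.\nAmount of legs in our calculation ({chickens} * 2 + {rabbits} * 4) = {total}.\nIn ths case my solution is {total == numlegs}"
-- ===== Notes on version B (the rewrite author's own statement) =====
-- stated objective: simpler
-- what changed: Replaced the simulation that builds a list of n 2s and repeatedly re-sums it while bumping legs from the back with the closed-form rabbits=(legs-2*heads)//2, chickens=heads-rabbits.
import Mathlib
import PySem

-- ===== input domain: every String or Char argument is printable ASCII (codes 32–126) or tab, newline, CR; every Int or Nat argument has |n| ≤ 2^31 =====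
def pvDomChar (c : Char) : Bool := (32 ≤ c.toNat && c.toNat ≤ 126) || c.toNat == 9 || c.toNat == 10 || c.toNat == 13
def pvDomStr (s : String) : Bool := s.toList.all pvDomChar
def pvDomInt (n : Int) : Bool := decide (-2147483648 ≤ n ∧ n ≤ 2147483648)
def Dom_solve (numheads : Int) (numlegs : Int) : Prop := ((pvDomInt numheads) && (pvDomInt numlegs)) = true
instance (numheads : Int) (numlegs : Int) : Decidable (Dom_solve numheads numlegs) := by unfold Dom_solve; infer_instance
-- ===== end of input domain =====

-- B replaces A's back-filling simulation (a list of n 2s, re-summed on every bump) with the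
-- closed form rabbits = (legs - 2*heads) // 2, chickens = heads - rabbits; same exact output.

-- ===== PORT A =====
-- A's 'while sum(lst) < numlegs: lst[i] += 2; i -= 1' (fuel only makes the recursion total;
-- on A's reachable states numheads.toNat iterations always suffice, see solve_spec)
def solveWhile (numlegs : Int) : Nat → List Int → Int → List Int
  | 0, lst, _ => lst
  | fuel + 1, lst, i =>
    if lst.sum < numlegs then
      solveWhile numlegs fuel (PySem.List.pySetD lst i (PySem.List.pyGetD lst i 0 + 2)) (i - 1)
    else lst

def solve (numheads : Int) (numlegs : Int) : String :=
  if numlegs < numheads * 2 ∨ numlegs > numheads * 4 ∨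
      (PySem.Int.mod numlegs 4 ≠ 0 ∧ PySem.Int.mod numlegs 2 ≠ 0) then
    "Impossible"
  else
    let lst0 := (PySem.List.pyRange 0 numheads 1).map (fun _ => (2 : Int))
    let lst := if lst0.sum < numlegs then solveWhile numlegs numheads.toNat lst0 (-1) else lst0
    let cr := lst.foldl
      (fun (p : Int × Int) x =>
        if x = 2 then (p.1 + 1, p.2) else if x = 4 then (p.1, p.2 + 1) else p) (0, 0)
    "Chickens: " ++ PySem.Int.toStr cr.1 ++ " , Rabbits : " ++ PySem.Int.toStr cr.2 ++
    ".\nChecking values  :\nInitial amount of legs = " ++ PySem.Int.toStr numlegs ++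
    ".\nAmount of legs in our calculation (" ++ PySem.Int.toStr cr.1 ++ " * 2 + " ++
    PySem.Int.toStr cr.2 ++ " * 4) = " ++ PySem.Int.toStr (cr.1 * 2 + cr.2 * 4) ++
    ".\nIn ths case my solution is " ++
    (if cr.1 * 2 + cr.2 * 4 = numlegs then "True" else "False")

-- ===== PORT B =====
def solve_alt (numheads : Int) (numlegs : Int) : String :=
  if numlegs < 2 * numheads ∨ numlegs > 4 * numheads ∨ PySem.Int.mod numlegs 2 ≠ 0 then
    "Impossible"
  else
    let rabbits := PySem.Int.floordiv (numlegs - 2 * numheads) 2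
    let chickens := numheads - rabbits
    let total := chickens * 2 + rabbits * 4
    "Chickens: " ++ PySem.Int.toStr chickens ++ " , Rabbits : " ++ PySem.Int.toStr rabbits ++
    ".\nChecking values  :\nInitial amount of legs = " ++ PySem.Int.toStr numlegs ++
    ".\nAmount of legs in our calculation (" ++ PySem.Int.toStr chickens ++ " * 2 + " ++
    PySem.Int.toStr rabbits ++ " * 4) = " ++ PySem.Int.toStr total ++
    ".\nIn ths case my solution is " ++ (if total = numlegs then "True" else "False")

-- ===== PRECONDITION & SPEC =====
def Spec_solve (numheads : Int) (numlegs : Int) (out : String) : Prop := out = solve_alt numheads numlegs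
instance (numheads : Int) (numlegs : Int) (out : String) : Decidable (Spec_solve numheads numlegs out) := by unfold Spec_solve; infer_instance

-- ===== CLAIM (what is proved, stated in full; the proofs are below) =====
def Claim_equal_solve : Prop := ∀ (numheads : Int) (numlegs : Int), Dom_solve numheads numlegs → Spec_solve numheads numlegs (solve numheads numlegs)

-- ===== LEMMAS AND PROOFS =====

-- no PySem lemma covers pySetD at a general negative index
lemma pySetD_neg_natCast (xs : List Int) (k : Nat) (v : Int) (h1 : 0 < k) (h2 : k ≤ xs.length) :
    PySem.List.pySetD xs (-(k : Int)) v = xs.set (xs.length - k) v := by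
  simp only [PySem.List.pySetD, PySem.List.pySet?, PySem.List.pyIdx?, Int.neg_nonneg,
    Int.natCast_nonpos_iff, Int.toNat_neg_natCast, neg_le_neg_iff, Nat.cast_le, neg_neg,
    Int.toNat_natCast]
  rw [if_neg (by omega), if_pos h2]
  rfl

lemma sum_rep (a b : Nat) :
    (List.replicate a (2 : Int) ++ List.replicate b 4).sum = 2 * (a : Int) + 4 * (b : Int) := by
  simp [List.sum_append, List.sum_replicate]
  ring

lemma loop_spec (l : Int) (hl : 2 ∣ l) :
    ∀ (fuel a b : Nat), l ≤ 2 * a + 4 * b + 2 * fuel → l ≤ 4 * a + 4 * b →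
      solveWhile l fuel (List.replicate a 2 ++ List.replicate b 4) (-(1 + (b : Int))) =
        List.replicate (a - ((l - 2 * a - 4 * b) / 2).toNat) 2 ++
        List.replicate (b + ((l - 2 * a - 4 * b) / 2).toNat) 4 := by
  intro fuel
  induction fuel with
  | zero =>
    intro a b hf _
    have ht : ((l - 2 * a - 4 * b) / 2).toNat = 0 := by omega
    simp [solveWhile, ht]
  | succ n ih =>
    intro a b hf hub
    rw [solveWhile, sum_rep]
    split_ifs with hc
    · -- loop body runs: a >= 1, the last 2 becomes a 4
      obtain ⟨a', rfl⟩ : ∃ a', a = a' + 1 := ⟨a - 1, by omega⟩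
      have hneg : -(1 + (b : Int)) = -(((b + 1 : Nat) : Int)) := by push_cast; ring
      have hget : PySem.List.pyGetD (List.replicate (a' + 1) (2 : Int) ++ List.replicate b 4)
          (-(((b + 1 : Nat) : Int))) 0 = 2 := by
        rw [PySem.List.pyGetD_neg_natCast _ _ _ (by omega) (by simp)]
        simp only [List.length_append, List.length_replicate]
        have e : a' + 1 + b - (b + 1) = a' := by omega
        simp only [e]
        rw [List.getElem_append_left (by simp)]
        simp
      have hset : PySem.List.pySetD (List.replicate (a' + 1) (2 : Int) ++ List.replicate b 4)
          (-(((b + 1 : Nat) : Int))) (2 + 2) = List.replicate a' 2 ++ List.replicate (b + 1) 4 := by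
        rw [pySetD_neg_natCast _ _ _ (by omega) (by simp)]
        simp only [List.length_append, List.length_replicate]
        have e : a' + 1 + b - (b + 1) = a' := by omega
        have hsplit : List.replicate (a' + 1) (2 : Int) ++ List.replicate b 4 =
            List.replicate a' 2 ++ 2 :: List.replicate b 4 := by
          simp [List.replicate_succ']
        rw [e, hsplit, List.set_append_right _ _ (by simp)]
        simp [List.replicate_succ]
      rw [hneg, hget, hset,
        show -(((b + 1 : Nat) : Int)) - 1 = -(1 + ((b + 1 : Nat) : Int)) by push_cast; ring,
        ih a' (b + 1) (by push_cast at hf ⊢; omega) (by push_cast at hub ⊢; omega)]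
      congr 1
      · congr 1
        push_cast at hc ⊢
        omega
      · congr 1
        push_cast at hc ⊢
        omega
    · have ht : ((l - 2 * a - 4 * b) / 2).toNat = 0 := by omega
      simp [ht]

lemma fold2 (f : Int × Int → Int → Int × Int)
    (hf : f = fun p x => if x = 2 then (p.1 + 1, p.2) else if x = 4 then (p.1, p.2 + 1) else p) :
    ∀ (c : Nat) (p : Int × Int), (List.replicate c (2 : Int)).foldl f p = (p.1 + c, p.2) := by
  intro c
  induction c with
  | zero => intro p; simp
  | succ n ih =>
    intro p
    rw [List.replicate_succ, List.foldl_cons, ih]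
    simp [hf]
    ring

lemma fold4 (f : Int × Int → Int → Int × Int)
    (hf : f = fun p x => if x = 2 then (p.1 + 1, p.2) else if x = 4 then (p.1, p.2 + 1) else p) :
    ∀ (r : Nat) (p : Int × Int), (List.replicate r (4 : Int)).foldl f p = (p.1, p.2 + r) := by
  intro r
  induction r with
  | zero => intro p; simp
  | succ n ih =>
    intro p
    rw [List.replicate_succ, List.foldl_cons, ih]
    simp [hf]
    ring

lemma init_rep (h : Int) :
    (PySem.List.pyRange 0 h 1).map (fun _ => (2 : Int)) = List.replicate h.toNat 2 := by
  rw [PySem.List.pyRange_one, List.map_map, List.eq_replicate_iff]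
  constructor
  · simp
  · intro b hb; simp at hb; exact hb.2.symm

lemma guard_iff (h l : Int) :
    (l < h * 2 ∨ l > h * 4 ∨ (PySem.Int.mod l 4 ≠ 0 ∧ PySem.Int.mod l 2 ≠ 0)) ↔
      (l < 2 * h ∨ l > 4 * h ∨ PySem.Int.mod l 2 ≠ 0) := by
  simp only [ne_eq, PySem.Int.mod_eq_zero_iff_dvd]
  omega

-- ===== VERDICT (by name: the statement is the Claim_ definition above) =====
theorem solve_spec : Claim_equal_solve := by
  intro h l _
  unfold Spec_solve
  by_cases hg : l < 2 * h ∨ l > 4 * h ∨ PySem.Int.mod l 2 ≠ 0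
  · unfold solve solve_alt
    rw [if_pos ((guard_iff h l).mpr hg), if_pos hg]
  · obtain ⟨hg1, hg23⟩ := not_or.mp hg
    obtain ⟨hg2, hg3⟩ := not_or.mp hg23
    have h1 : 2 * h ≤ l := by omega
    have h2 : l ≤ 4 * h := by omega
    have h3 : (2 : Int) ∣ l := by
      simpa only [PySem.Int.mod_eq_zero_iff_dvd, not_not] using hg3
    have hh : 0 ≤ h := by omega
    obtain ⟨n, rfl⟩ : ∃ n : Nat, h = (n : Int) := ⟨h.toNat, (Int.toNat_of_nonneg hh).symm⟩
    simp only [solve, solve_alt, Int.toNat_natCast, init_rep]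
    rw [if_neg (fun c => hg ((guard_iff _ l).mp c)), if_neg hg]
    have hlst : (if (List.replicate n (2 : Int)).sum < l then
        solveWhile l n (List.replicate n 2) (-1) else List.replicate n 2) =
        List.replicate (n - ((l - 2 * (n : Int)) / 2).toNat) 2 ++
        List.replicate (((l - 2 * (n : Int)) / 2).toNat) 4 := by
      have hsum : (List.replicate n (2 : Int)).sum = 2 * (n : Int) := by
        simpa using sum_rep n 0
      split_ifs with hc
      · have hls := loop_spec l h3 n n 0 (by rw [hsum] at hc; push_cast; omega)
          (by push_cast; omega)
        simp only [List.replicate_zero, List.append_nil, Nat.zero_add] at hls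
        rw [show (-1 : Int) = -(1 + ((0 : Nat) : Int)) by norm_num, hls]
        congr 2 <;> · congr 1; push_cast; omega
      · rw [hsum] at hc
        have ht : ((l - 2 * (n : Int)) / 2).toNat = 0 := by omega
        simp [ht]
    have hfold : (List.replicate (n - ((l - 2 * (n : Int)) / 2).toNat) (2 : Int) ++
        List.replicate (((l - 2 * (n : Int)) / 2).toNat) 4).foldl
        (fun (p : Int × Int) x =>
          if x = 2 then (p.1 + 1, p.2) else if x = 4 then (p.1, p.2 + 1) else p) (0, 0) =
        ((n : Int) - (l - 2 * (n : Int)) / 2, (l - 2 * (n : Int)) / 2) := by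
      rw [List.foldl_append, fold2 _ rfl, fold4 _ rfl]
      have e1 : (0 : Int) + ((n - ((l - 2 * (n : Int)) / 2).toNat : Nat) : Int) =
          (n : Int) - (l - 2 * (n : Int)) / 2 := by omega
      have e2 : (0 : Int) + ((((l - 2 * (n : Int)) / 2).toNat : Nat) : Int) =
          (l - 2 * (n : Int)) / 2 := by omega
      rw [e1, e2]
    rw [hlst, hfold, PySem.Int.floordiv_eq_ediv_of_pos (by norm_num)]
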